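-- pv_equiv track=rewrite | github.com/ttttxx/polya | icosahedron/coloring.py | count_fixed_by_permutation
-- ===== SOURCE A (Python) =====
-- def count_fixed_by_permutation(colors, color_counts, sizes):
--     """
--     计算在给定置换下保持不变的染色方案数。
--     :param colors: 颜色列表
--     :param color_counts: dict，颜色->该颜色应使用的次数
--     :param sizes: 轮换大小列表
--     :return: 整数，表示固定染色方案数
--     """
--     # 按 colors 顺序提取计数
--     counts_list = [color_counts[c] for c in colors]
--     sorted_sizes = sorted(sizes, reverse=True)
--     memo = {}
--
--     def dp(i, remaining):
--         if i == len(sorted_sizes):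
--             return 1 if all(r == 0 for r in remaining) else 0
--
--         key = (i, tuple(remaining))
--         if key in memo:
--             return memo[key]
--
--         total = 0
--         s = sorted_sizes[i]
--         for c_idx in range(len(colors)):
--             if remaining[c_idx] >= s:
--                 new_remaining = list(remaining)
--                 new_remaining[c_idx] -= s
--                 total += dp(i + 1, new_remaining)
--         memo[key] = total
--         return total
--
--     return dp(0, counts_list)
-- ===== SOURCE B (Python) =====
-- def count_fixed_by_permutation(colors, color_counts, sizes):
--     """Bottom-up iterative DP over a dictionary of remaining-count states."""
--     counts_list = [color_counts[c] for c in colors]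
--     n = len(colors)
--     states = {tuple(counts_list): 1}
--     for s in sorted(sizes, reverse=True):
--         new_states = {}
--         for rem, ways in states.items():
--             for i in range(n):
--                 if rem[i] >= s:
--                     t = rem[:i] + (rem[i] - s,) + rem[i + 1:]
--                     new_states[t] = new_states.get(t, 0) + ways
--         states = new_states
--     return sum(ways for t, ways in states.items() if all(r == 0 for r in t))
-- ===== Notes on version B (the rewrite author's own statement) =====
-- stated objective: alternative
-- what changed: Top-down memoized recursion dp(i, remaining) is replaced by a bottom-up iterative DP: a dictionary mapping remaining-count tuples to way counts is advanced one layer per cycle size, and the ways at the all-zero tuples are summed at the end.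
import Mathlib
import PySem

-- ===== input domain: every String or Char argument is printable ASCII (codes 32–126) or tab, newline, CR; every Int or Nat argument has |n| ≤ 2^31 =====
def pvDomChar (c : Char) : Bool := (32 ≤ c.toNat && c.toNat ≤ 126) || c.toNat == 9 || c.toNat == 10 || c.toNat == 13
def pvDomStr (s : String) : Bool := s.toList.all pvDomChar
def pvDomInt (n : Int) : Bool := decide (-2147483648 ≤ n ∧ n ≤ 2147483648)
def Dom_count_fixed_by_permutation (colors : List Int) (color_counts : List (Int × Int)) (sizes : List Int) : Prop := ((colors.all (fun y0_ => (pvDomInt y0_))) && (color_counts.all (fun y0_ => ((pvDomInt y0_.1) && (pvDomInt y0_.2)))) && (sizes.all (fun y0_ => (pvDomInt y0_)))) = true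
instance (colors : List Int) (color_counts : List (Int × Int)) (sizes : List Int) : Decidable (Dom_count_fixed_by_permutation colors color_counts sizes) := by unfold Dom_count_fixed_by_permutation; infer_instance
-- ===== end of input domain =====

-- B replaces A's top-down memoized recursion by a bottom-up dictionary DP over remaining-count
-- states (alternative decomposition, similar cost).  A's memo dict is a pure cache that never
-- changes the returned value; A's port is the same recursion transcribed without the cache.

-- ===== PORT A =====
-- dp(i, remaining): recursion over the suffix of sorted_sizes (i is the consumed prefix length,
-- carried implicitly by recursing on the suffix).  remaining[c_idx] is in range (remaining always
-- has length len(colors)), ported with getD 0 which is exact in range; new_remaining via List.set.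
mutual
def pvDpA (colors : List Int) (rest : List Int) (remaining : List Int) : Int :=
  match rest with
  | [] => if remaining.all (fun r => r == 0) then 1 else 0
  | s :: rest' => pvDpALoop colors rest' s remaining (List.range colors.length) 0
termination_by (rest.length, 1, 0)

-- the 'for c_idx in range(len(colors))' loop accumulating total
def pvDpALoop (colors : List Int) (rest' : List Int) (s : Int) (remaining : List Int)
    (idxs : List Nat) (total : Int) : Int :=
  match idxs with
  | [] => total
  | i :: idxs' =>
      if remaining.getD i 0 ≥ s then
        pvDpALoop colors rest' s remaining idxs'
          (total + pvDpA colors rest' (remaining.set i (remaining.getD i 0 - s)))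
      else
        pvDpALoop colors rest' s remaining idxs' total
termination_by (rest'.length + 1, 0, idxs.length)
end

def count_fixed_by_permutation (colors : List Int) (color_counts : List (Int × Int)) (sizes : List Int) : Int :=
  -- counts_list = [color_counts[c] for c in colors]; dict lookup = first match in the assoc list
  -- (KeyError, i.e. no match, is excluded by Pre_; getD 0 is only reached outside Pre_)
  let counts_list := colors.map (fun c => ((color_counts.find? (fun p => p.1 == c)).map Prod.snd).getD 0)
  let sorted_sizes := PySem.List.sorted sizes (fun x => x) true
  pvDpA colors sorted_sizes counts_list

-- ===== PORT B =====
-- one DP layer: for every (rem, ways) in states and every color index i with rem[i] >= s,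
-- add ways at the decremented tuple in the fresh dictionary
def pvStepB (n : Nat) (s : Int) (states : PySem.Dict (List Int) Int) : PySem.Dict (List Int) Int :=
  states.items.foldl (fun new_states p =>
    (List.range n).foldl (fun new_states i =>
      if p.1.getD i 0 ≥ s then
        new_states.insert (p.1.set i (p.1.getD i 0 - s))
          (new_states.getD (p.1.set i (p.1.getD i 0 - s)) 0 + p.2)
      else new_states) new_states) PySem.Dict.empty

def count_fixed_by_permutation_alt (colors : List Int) (color_counts : List (Int × Int)) (sizes : List Int) : Int :=
  let counts_list := colors.map (fun c => ((color_counts.find? (fun p => p.1 == c)).map Prod.snd).getD 0)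
  let n := colors.length
  let states0 := (PySem.Dict.empty : PySem.Dict (List Int) Int).insert counts_list 1
  let states := (PySem.List.sorted sizes (fun x => x) true).foldl (fun st s => pvStepB n s st) states0
  states.items.foldl (fun acc p => acc + (if p.1.all (fun r => r == 0) then p.2 else 0)) 0

-- ===== PRECONDITION & SPEC =====
-- Pre_ excludes exactly the inputs on which the Python A raises KeyError: some color of `colors`
-- has no entry in `color_counts` (the Python B raises there too).
def Pre_count_fixed_by_permutation (colors : List Int) (color_counts : List (Int × Int)) (sizes : List Int) : Prop :=
  (colors.all (fun c => color_counts.any (fun p => p.1 == c))) = true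
instance (colors : List Int) (color_counts : List (Int × Int)) (sizes : List Int) : Decidable (Pre_count_fixed_by_permutation colors color_counts sizes) := by unfold Pre_count_fixed_by_permutation; infer_instance

def pvWitness_count_fixed_by_permutation : List Int × (List (Int × Int)) × List Int :=
  ([1, 2], [(1, 2), (2, 1)], [2, 1])

def Spec_count_fixed_by_permutation (colors : List Int) (color_counts : List (Int × Int)) (sizes : List Int) (out : Int) : Prop := out = count_fixed_by_permutation_alt colors color_counts sizes
instance (colors : List Int) (color_counts : List (Int × Int)) (sizes : List Int) (out : Int) : Decidable (Spec_count_fixed_by_permutation colors color_counts sizes out) := by unfold Spec_count_fixed_by_permutation; infer_instance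

-- ===== CLAIM (what is proved, stated in full; the proofs are below) =====
def Claim_equal_count_fixed_by_permutation : Prop := ∀ (colors : List Int) (color_counts : List (Int × Int)) (sizes : List Int), Dom_count_fixed_by_permutation colors color_counts sizes → Pre_count_fixed_by_permutation colors color_counts sizes → Spec_count_fixed_by_permutation colors color_counts sizes (count_fixed_by_permutation colors color_counts sizes)

-- ===== LEMMAS AND PROOFS =====

-- weighted sum over a dict's items: Σ ways * g(state)
def pvS (g : List Int → Int) (l : List (List Int × Int)) : Int :=
  (l.map (fun p => p.2 * g p.1)).sum

theorem pvDpALoop_sum (colors rest' : List Int) (s : Int) (rem : List Int) :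
    ∀ (idxs : List Nat) (total : Int),
      pvDpALoop colors rest' s rem idxs total
        = total + ((idxs.map (fun i =>
            if rem.getD i 0 ≥ s then pvDpA colors rest' (rem.set i (rem.getD i 0 - s)) else 0)).sum) := by
  intro idxs
  induction idxs with
  | nil => intro total; simp [pvDpALoop]
  | cons i idxs ih =>
      intro total
      simp only [pvDpALoop, List.map_cons, List.sum_cons]
      split_ifs with h <;> rw [ih] <;> ring

theorem pvDpA_cons (colors : List Int) (s : Int) (rest' rem : List Int) :
    pvDpA colors (s :: rest') rem
      = ((List.range colors.length).map (fun i =>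
          if rem.getD i 0 ≥ s then pvDpA colors rest' (rem.set i (rem.getD i 0 - s)) else 0)).sum := by
  rw [pvDpA, pvDpALoop_sum]; ring

-- replacing the (unique) entry at key k by (k, v + w) adds w * g k to the weighted sum
theorem pvList_replace_sum (g : List Int → Int) (k : List Int) (w : Int) :
    ∀ (l : List (List Int × Int)) (v : Int), (l.map Prod.fst).Nodup → (k, v) ∈ l →
      (((l.map (fun p => if p.1 == k then (k, v + w) else p)).map (fun p => p.2 * g p.1)).sum)
        = ((l.map (fun p => p.2 * g p.1)).sum) + w * g k := by
  intro l
  induction l with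
  | nil => intro v _ hv; simp at hv
  | cons q l ih =>
      intro v hnd hv
      simp only [List.map_cons, List.nodup_cons, List.mem_map] at hnd
      rcases List.mem_cons.mp hv with hq | hmem
      · subst hq
        have hrest : ∀ p ∈ l, (p.1 == k) = false := by
          intro p hp
          by_contra hc
          exact hnd.1 ⟨p, hp, by simpa using (eq_of_beq (by simpa using hc))⟩
        have hmap : l.map (fun p => if p.1 == k then (k, v + w) else p) = l := by
          have hcongr := List.map_congr_left (l := l)
            (f := fun p => if p.1 == k then (k, v + w) else p) (g := fun p => p)
            (fun p hp => by simp [hrest p hp])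
          simpa using hcongr
        rw [List.map_cons, hmap, List.map_cons, List.sum_cons, List.map_cons, List.sum_cons]
        have hF : (if ((k, v).1 == k) = true then (k, v + w) else (k, v)) = (k, v + w) := by simp
        rw [hF]
        ring
      · have hq : (q.1 == k) = false := by
          by_contra hc
          have hk : q.1 = k := by simpa using (eq_of_beq (by simpa using hc))
          exact hnd.1 ⟨(k, v), hmem, by simp [hk]⟩
        simp only [List.map_cons, hq, Bool.false_eq_true, if_false, List.sum_cons]
        rw [ih v hnd.2 hmem]; ring

theorem pvDict_insert_sum (g : List Int → Int) (d : PySem.Dict (List Int) Int)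
    (hnd : d.keys.Nodup) (k : List Int) (w : Int) :
    pvS g (d.insert k (d.getD k 0 + w)).items = pvS g d.items + w * g k := by
  by_cases h : d.contains k = true
  · obtain ⟨v, hv⟩ : ∃ v, d.get? k = some v := by
      cases hg : d.get? k with
      | none => exact absurd ((PySem.Dict.get?_eq_none_iff_contains d k).mp hg) (by simp [h])
      | some v => exact ⟨v, rfl⟩
    have hmem : (k, v) ∈ d.items := PySem.Dict.mem_items_of_get?_eq_some d hv
    have hgd : d.getD k 0 = v := PySem.Dict.getD_of_get?_eq_some d 0 hv
    rw [pvS, pvS, PySem.Dict.items_insert_of_contains d _ h, hgd]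
    have hnd' : (d.items.map Prod.fst).Nodup := by
      simpa [PySem.Dict.keys] using hnd
    exact pvList_replace_sum g k w d.items v hnd' hmem
  · rw [pvS, pvS, PySem.Dict.items_insert_of_not_contains d _ (by simpa using h),
        PySem.Dict.getD_of_not_contains d 0 (by simpa using h)]
    simp

-- the inner-fold body of pvStepB for a fixed source state (rem, w)
theorem pvInner_fold (colors rest' : List Int) (s : Int) (rem : List Int) (w : Int) :
    ∀ (idxs : List Nat) (nd : PySem.Dict (List Int) Int), nd.keys.Nodup →
      pvS (pvDpA colors rest')
        (idxs.foldl (fun new i =>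
          if rem.getD i 0 ≥ s then
            new.insert (rem.set i (rem.getD i 0 - s)) (new.getD (rem.set i (rem.getD i 0 - s)) 0 + w)
          else new) nd).items
        = pvS (pvDpA colors rest') nd.items
          + w * ((idxs.map (fun i =>
              if rem.getD i 0 ≥ s then pvDpA colors rest' (rem.set i (rem.getD i 0 - s)) else 0)).sum) := by
  intro idxs
  induction idxs with
  | nil => intro nd _; simp
  | cons i idxs ih =>
      intro nd hnd
      by_cases h : rem.getD i 0 ≥ s
      · simp only [List.foldl_cons, h, if_true, List.map_cons, List.sum_cons]
        rw [ih _ (PySem.Dict.nodup_keys_insert _ _ _ hnd),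
            pvDict_insert_sum _ _ hnd]
        simp [h]; ring
      · simp only [List.foldl_cons, h, if_false, List.map_cons, List.sum_cons]
        rw [ih _ hnd]
        simp

theorem pvInner_nodup (s : Int) (rem : List Int) (w : Int) :
    ∀ (idxs : List Nat) (nd : PySem.Dict (List Int) Int), nd.keys.Nodup →
      (idxs.foldl (fun new i =>
          if rem.getD i 0 ≥ s then
            new.insert (rem.set i (rem.getD i 0 - s)) (new.getD (rem.set i (rem.getD i 0 - s)) 0 + w)
          else new) nd).keys.Nodup := by
  intro idxs
  induction idxs with
  | nil => intro nd hnd; exact hnd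
  | cons i idxs ih =>
      intro nd hnd
      by_cases h : rem.getD i 0 ≥ s
      · simp only [List.foldl_cons, h, if_true]
        exact ih _ (PySem.Dict.nodup_keys_insert _ _ _ hnd)
      · simp only [List.foldl_cons, h, if_false]
        exact ih _ hnd

theorem pvStep_fold (colors rest' : List Int) (s : Int) :
    ∀ (ps : List (List Int × Int)) (nd : PySem.Dict (List Int) Int), nd.keys.Nodup →
      pvS (pvDpA colors rest')
        (ps.foldl (fun new p =>
          (List.range colors.length).foldl (fun new i =>
            if p.1.getD i 0 ≥ s then
              new.insert (p.1.set i (p.1.getD i 0 - s)) (new.getD (p.1.set i (p.1.getD i 0 - s)) 0 + p.2)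
            else new) new) nd).items
        = pvS (pvDpA colors rest') nd.items + pvS (pvDpA colors (s :: rest')) ps := by
  intro ps
  induction ps with
  | nil => intro nd _; simp [pvS]
  | cons p ps ih =>
      intro nd hnd
      simp only [List.foldl_cons]
      rw [ih _ (pvInner_nodup s p.1 p.2 _ nd hnd),
          pvInner_fold colors rest' s p.1 p.2 _ nd hnd, ← pvDpA_cons]
      simp [pvS]; ring

theorem pvOuter_nodup (n : Nat) (s : Int) :
    ∀ (ps : List (List Int × Int)) (nd : PySem.Dict (List Int) Int), nd.keys.Nodup →
      (ps.foldl (fun new p =>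
        (List.range n).foldl (fun new i =>
          if p.1.getD i 0 ≥ s then
            new.insert (p.1.set i (p.1.getD i 0 - s)) (new.getD (p.1.set i (p.1.getD i 0 - s)) 0 + p.2)
          else new) new) nd).keys.Nodup := by
  intro ps
  induction ps with
  | nil => intro nd hnd; exact hnd
  | cons p ps ih =>
      intro nd hnd
      exact ih _ (pvInner_nodup s p.1 p.2 _ nd hnd)

theorem pvStepB_nodup (n : Nat) (s : Int) (d : PySem.Dict (List Int) Int) :
    (pvStepB n s d).keys.Nodup := by
  rw [pvStepB]
  exact pvOuter_nodup n s d.items PySem.Dict.empty (by simpa using PySem.Dict.nodup_keys_empty (κ := List Int) (ν := Int))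

theorem pvMain_fold (colors : List Int) :
    ∀ (ss : List Int) (d : PySem.Dict (List Int) Int), d.keys.Nodup →
      (ss.foldl (fun st s => pvStepB colors.length s st) d).items.foldl
          (fun acc p => acc + (if p.1.all (fun r => r == 0) then p.2 else 0)) 0
        = pvS (pvDpA colors ss) d.items := by
  intro ss
  induction ss with
  | nil =>
      intro d _
      rw [PySem.List.foldl_add]
      simp only [pvS, pvDpA, zero_add]
      apply congrArg
      apply List.map_congr_left
      intro p _
      by_cases h : p.1.all (fun r => r == 0) = true <;> simp [h]
  | cons s ss ih =>
      intro d hnd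
      simp only [List.foldl_cons]
      rw [ih _ (pvStepB_nodup colors.length s d)]
      have := pvStep_fold colors ss s d.items PySem.Dict.empty (by simpa using PySem.Dict.nodup_keys_empty (κ := List Int) (ν := Int))
      rw [pvStepB]
      rw [this]
      simp [pvS, PySem.Dict.empty]

-- ===== VERDICT (by name: the statement is the Claim_ definition above) =====
theorem count_fixed_by_permutation_spec : Claim_equal_count_fixed_by_permutation := by
  intro colors color_counts sizes _ _
  unfold Spec_count_fixed_by_permutation
  simp only [count_fixed_by_permutation, count_fixed_by_permutation_alt]
  rw [pvMain_fold colors (PySem.List.sorted sizes (fun x => x) true) _ (PySem.Dict.nodup_keys_insert _ _ _ (by simpa using PySem.Dict.nodup_keys_empty (κ := List Int) (ν := Int)))]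
  rw [PySem.Dict.items_insert_of_not_contains _ _ (by simp)]
  simp [pvS, PySem.Dict.empty]
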